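-- pv_equiv track=rewrite | github.com/ANDnXOR/cyphercon2024_badge_serial | badge_checksum.py | calculate_intel_hex_checksum
-- ===== SOURCE A (Python) =====
-- def calculate_intel_hex_checksum(badge_id):
--     # Convert the badge ID to a 2-byte little-endian format
--     badge_id_bytes = badge_id.to_bytes(2, 'little')
--
--     # Construct the record content before checksum
--     # Start with :02000000 which is the standard header for this type of record
--     header = ':02000000'
--     # Convert each byte to a two-character hex string and uppercase it
--     data = ''.join(f'{b:02X}' for b in badge_id_bytes)
--     record_without_checksum = header + data
--
--     # Calculate the checksum:
--     # Convert all bytes including header to integers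
--     byte_values = [
--         int(record_without_checksum[i:i+2], 16) for i in range(1, len(record_without_checksum), 2)
--     ]
--     # Sum all byte values
--     total_sum = sum(byte_values)
--     # Get the least significant byte of the sum
--     lsb = total_sum & 0xFF
--     # Compute the two's complement of the LSB
--     checksum = (~lsb + 1) & 0xFF
--
--     # Complete the record with the checksum
--     full_record = record_without_checksum + f'{checksum:02X}'
--
--     return full_record
-- ===== SOURCE B (Python) =====
-- def calculate_intel_hex_checksum(badge_id):
--     # Build the record bytes directly: length, address hi/lo, record type, then the two ID bytes.
--     byte_list = [0x02, 0x00, 0x00, 0x00, *badge_id.to_bytes(2, 'little')]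
--     # Two's-complement checksum computed straight from the integer bytes (no string re-parsing).
--     checksum = -sum(byte_list) & 0xFF
--     return ':' + ''.join(f'{b:02X}' for b in byte_list) + f'{checksum:02X}'
-- ===== Notes on version B (the rewrite author's own statement) =====
-- stated objective: simpler
-- what changed: B builds the six record bytes as integers and computes the two's-complement checksum directly from their sum, eliminating A's pass that re-slices its own hex string and re-parses each pair with int(...,16).
import Mathlib
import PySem

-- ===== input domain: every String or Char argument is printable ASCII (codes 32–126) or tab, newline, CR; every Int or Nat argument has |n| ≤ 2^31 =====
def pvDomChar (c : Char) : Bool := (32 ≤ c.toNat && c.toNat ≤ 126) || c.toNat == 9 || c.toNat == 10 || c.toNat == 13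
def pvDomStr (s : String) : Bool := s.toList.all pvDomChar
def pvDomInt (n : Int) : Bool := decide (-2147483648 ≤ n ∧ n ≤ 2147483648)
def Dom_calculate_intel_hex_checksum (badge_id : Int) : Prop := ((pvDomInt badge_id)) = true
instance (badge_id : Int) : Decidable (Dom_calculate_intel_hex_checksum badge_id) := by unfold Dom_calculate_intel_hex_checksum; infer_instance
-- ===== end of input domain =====

-- B computes the checksum directly from the integer record bytes (negated sum, masked) instead of
-- re-slicing and re-parsing the constructed hex string; objective: simpler.

-- shared formatting helper: f'{b:02X}', exact for 0 ≤ b < 256 (both Pythons use this same f-string)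
def pvHexDigit (n : Nat) : Char := ['0','1','2','3','4','5','6','7','8','9','A','B','C','D','E','F'].getD n '0'
def pvHex2 (b : Int) : List Char := [pvHexDigit (b.toNat / 16), pvHexDigit (b.toNat % 16)]

-- ===== PORT A =====
def calculate_intel_hex_checksum (badge_id : Int) : String :=
  -- badge_id.to_bytes(2, 'little'): exact for 0 ≤ badge_id < 2^16 (guaranteed by Pre_; Python raises OverflowError otherwise)
  let badge_id_bytes : List Int :=
    [PySem.Int.mod badge_id 256, PySem.Int.mod (PySem.Int.floordiv badge_id 256) 256]
  let header : List Char := [':','0','2','0','0','0','0','0','0']  -- ':02000000'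
  let data : List Char := (badge_id_bytes.map pvHex2).flatten     -- ''.join(f'{b:02X}' for b in badge_id_bytes)
  let record_without_checksum : List Char := header ++ data
  -- int(record[i:i+2], 16): the slices here are always hex pairs, so the ValueError branch (none) never fires; .getD 0 marks it
  let byte_values : List Int :=
    (PySem.List.pyRange 1 (PySem.List.len record_without_checksum) 2).map
      (fun i => (PySem.Int.ofCharsBase? (PySem.List.slice record_without_checksum (some i) (some (i + 2))) 16).getD 0)
  let total_sum : Int := byte_values.foldl (· + ·) 0
  let lsb : Int := PySem.Int.band total_sum 255
  let checksum : Int := PySem.Int.band (Int.not lsb + 1) 255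
  String.ofList (record_without_checksum ++ pvHex2 checksum)

-- ===== PORT B =====
def calculate_intel_hex_checksum_alt (badge_id : Int) : String :=
  -- [0x02, 0x00, 0x00, 0x00, *badge_id.to_bytes(2, 'little')] (to_bytes exact under Pre_, as in port A)
  let byte_list : List Int :=
    [2, 0, 0, 0, PySem.Int.mod badge_id 256, PySem.Int.mod (PySem.Int.floordiv badge_id 256) 256]
  let checksum : Int := PySem.Int.band (-(byte_list.foldl (· + ·) 0)) 255
  String.ofList (':' :: (byte_list ++ [checksum]).flatMap pvHex2)

-- ===== PRECONDITION & SPEC =====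
-- Pre_ excludes exactly the inputs where A (and B) raise OverflowError in to_bytes(2, 'little').
def Pre_calculate_intel_hex_checksum (badge_id : Int) : Prop := 0 ≤ badge_id ∧ badge_id < 65536
instance (badge_id : Int) : Decidable (Pre_calculate_intel_hex_checksum badge_id) := by unfold Pre_calculate_intel_hex_checksum; infer_instance
def pvWitness_calculate_intel_hex_checksum : Int := 4660

def Spec_calculate_intel_hex_checksum (badge_id : Int) (out : String) : Prop := out = calculate_intel_hex_checksum_alt badge_id
instance (badge_id : Int) (out : String) : Decidable (Spec_calculate_intel_hex_checksum badge_id out) := by unfold Spec_calculate_intel_hex_checksum; infer_instance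

-- ===== CLAIM (what is proved, stated in full; the proofs are below) =====
def Claim_equal_calculate_intel_hex_checksum : Prop := ∀ (badge_id : Int), Dom_calculate_intel_hex_checksum badge_id → Pre_calculate_intel_hex_checksum badge_id → Spec_calculate_intel_hex_checksum badge_id (calculate_intel_hex_checksum badge_id)

-- ===== LEMMAS AND PROOFS =====

-- every 02X-formatted byte parses back to itself (checked once over all 256 bytes)
set_option maxRecDepth 8192 in
lemma allhex : ((List.range 256).all
    (fun n => PySem.Int.ofCharsBase? (pvHex2 n) 16 == some n)) = true := by decide

lemma parse_hex2 (n : Nat) (h : n < 256) :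
    PySem.Int.ofCharsBase? (pvHex2 (n : Int)) 16 = some (n : Int) := by
  have := List.all_eq_true.mp allhex n (List.mem_range.mpr h)
  simpa using this

-- masking with 0xFF is reduction mod 256, also on negatives (Python two's complement)
lemma band255 (x : Int) : PySem.Int.band x 255 = x % 256 := by
  simp only [PySem.Int.band]
  norm_num
  split_ifs with h
  · rw [show ((255:Int)).toNat = 2^8-1 from rfl, Nat.and_two_pow_sub_one_eq_mod]
    omega
  · rw [show ((255:Int)).toNat = 2^8-1 from rfl, Nat.and_comm, Nat.and_two_pow_sub_one_eq_mod]
    omega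

lemma int_not_eq (x : Int) : Int.not x = -x - 1 := by
  cases x with
  | ofNat n => rw [show Int.not (Int.ofNat n) = Int.negSucc n from rfl, Int.negSucc_eq,
      Int.ofNat_eq_natCast]; ring
  | negSucc n => rw [show Int.not (Int.negSucc n) = Int.ofNat n from rfl, Int.negSucc_eq,
      Int.ofNat_eq_natCast]; ring

-- A's two's complement of the masked sum equals B's masked negated sum
lemma checksum_eq (t : Int) :
    PySem.Int.band (Int.not (PySem.Int.band t 255) + 1) 255 = PySem.Int.band (-t) 255 := by
  rw [band255, band255, band255, int_not_eq]
  omega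

theorem calculate_intel_hex_checksum_aux (badge_id : Int)
    (h0 : 0 ≤ badge_id) (h1 : badge_id < 65536) :
    calculate_intel_hex_checksum badge_id = calculate_intel_hex_checksum_alt badge_id := by
  obtain ⟨n, rfl⟩ : ∃ n : Nat, badge_id = (n : Int) := ⟨badge_id.toNat, (Int.toNat_of_nonneg h0).symm⟩
  have hlo : PySem.Int.mod (n : Int) 256 = ((n % 256 : Nat) : Int) := PySem.Int.mod_natCast n 256
  have hhi : PySem.Int.mod (PySem.Int.floordiv (n : Int) 256) 256 = ((n / 256 % 256 : Nat) : Int) := by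
    have hd := PySem.Int.floordiv_natCast n 256
    push_cast at hd
    rw [hd]
    exact_mod_cast PySem.Int.mod_natCast (n / 256) 256
  simp only [calculate_intel_hex_checksum, calculate_intel_hex_checksum_alt, hlo, hhi]
  set ln : Nat := n % 256 with hlndef
  set hn : Nat := n / 256 % 256 with hhndef
  -- the record is 13 characters long
  have e1 : PySem.List.len ([':','0','2','0','0','0','0','0','0'] ++
      (([((ln : Nat) : Int), ((hn : Nat) : Int)].map pvHex2).flatten)) = 13 := by
    simp [PySem.List.len_eq, pvHex2]
  rw [e1, show PySem.List.pyRange 1 13 2 = [1, 3, 5, 7, 9, 11] from by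
    rw [PySem.List.pyRange_of_pos 1 13 (by norm_num)]; norm_num
    rw [show ((6 : Int)).toNat = 6 from rfl]; decide]
  simp only [List.map_cons, List.map_nil]
  -- the six two-character slices of the record
  have c1 : PySem.List.slice ([':','0','2','0','0','0','0','0','0'] ++
      ([pvHex2 ((ln : Nat) : Int), pvHex2 ((hn : Nat) : Int)].flatten)) (some 1) (some (1 + 2))
      = ['0','2'] := rfl
  have c3 : PySem.List.slice ([':','0','2','0','0','0','0','0','0'] ++
      ([pvHex2 ((ln : Nat) : Int), pvHex2 ((hn : Nat) : Int)].flatten)) (some 3) (some (3 + 2))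
      = ['0','0'] := rfl
  have c5 : PySem.List.slice ([':','0','2','0','0','0','0','0','0'] ++
      ([pvHex2 ((ln : Nat) : Int), pvHex2 ((hn : Nat) : Int)].flatten)) (some 5) (some (5 + 2))
      = ['0','0'] := rfl
  have c7 : PySem.List.slice ([':','0','2','0','0','0','0','0','0'] ++
      ([pvHex2 ((ln : Nat) : Int), pvHex2 ((hn : Nat) : Int)].flatten)) (some 7) (some (7 + 2))
      = ['0','0'] := rfl
  have s9 : PySem.List.slice ([':','0','2','0','0','0','0','0','0'] ++
      ([pvHex2 ((ln : Nat) : Int), pvHex2 ((hn : Nat) : Int)].flatten)) (some 9) (some (9 + 2))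
      = pvHex2 ((ln : Nat) : Int) := rfl
  have s11 : PySem.List.slice ([':','0','2','0','0','0','0','0','0'] ++
      ([pvHex2 ((ln : Nat) : Int), pvHex2 ((hn : Nat) : Int)].flatten)) (some 11) (some (11 + 2))
      = pvHex2 ((hn : Nat) : Int) := rfl
  rw [c1, c3, c5, c7, s9, s11,
    parse_hex2 ln (Nat.mod_lt _ (by norm_num)), parse_hex2 hn (Nat.mod_lt _ (by norm_num)),
    show (PySem.Int.ofCharsBase? ['0','2'] 16).getD 0 = 2 from by decide,
    show (PySem.Int.ofCharsBase? ['0','0'] 16).getD 0 = 0 from by decide]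
  simp only [Option.getD_some]
  rw [checksum_eq]
  rfl

-- ===== VERDICT (by name: the statement is the Claim_ definition above) =====
theorem calculate_intel_hex_checksum_spec : Claim_equal_calculate_intel_hex_checksum := by
  intro b _ hpre
  exact calculate_intel_hex_checksum_aux b hpre.1 hpre.2
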